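-- pv_equiv track=rewrite | github.com/eliottcassidy2000/math | 04-computation/baer_cyclotomic_factorization.py | check_baer
-- ===== SOURCE A (Python) =====
-- def check_baer(point_indices, all_lines):
--     """Check if a set of 7 points forms a Baer subplane."""
--     if len(point_indices) != 7:
--         return False
--     pset = set(point_indices)
--
--     # Check: every line meets it in 1 or 3 points
--     for line in all_lines:
--         inter = len(set(line) & pset)
--         if inter not in [1, 3]:
--             return False
--
--     # Check: C(7,2) = 21 pairs, each pair on a unique line
--     # and there should be 7 internal lines (meeting in 3)
--     internal_lines = 0
--     for line in all_lines:
--         if len(set(line) & pset) == 3: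
--             internal_lines += 1
--
--     return internal_lines == 7
-- ===== SOURCE B (Python) =====
-- def check_baer(point_indices, all_lines):
--     """Check if a set of 7 points forms a Baer subplane."""
--     if len(point_indices) != 7:
--         return False
--     pset = set(point_indices)
--     sizes = [len(set(line) & pset) for line in all_lines]
--     counts = {}
--     for k in sizes:
--         counts[k] = counts.get(k, 0) + 1
--     return all(k in (1, 3) for k in counts) and counts.get(3, 0) == 7
-- ===== Notes on version B (the rewrite author's own statement) =====
-- stated objective: simpler
-- what changed: A's two explicit scans with an early-return check plus a separate counting loop are replaced by building one frequency table of per-line intersection sizes and validating the table (keys subset of {1,3} and exactly seven 3-lines).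
import Mathlib
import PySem

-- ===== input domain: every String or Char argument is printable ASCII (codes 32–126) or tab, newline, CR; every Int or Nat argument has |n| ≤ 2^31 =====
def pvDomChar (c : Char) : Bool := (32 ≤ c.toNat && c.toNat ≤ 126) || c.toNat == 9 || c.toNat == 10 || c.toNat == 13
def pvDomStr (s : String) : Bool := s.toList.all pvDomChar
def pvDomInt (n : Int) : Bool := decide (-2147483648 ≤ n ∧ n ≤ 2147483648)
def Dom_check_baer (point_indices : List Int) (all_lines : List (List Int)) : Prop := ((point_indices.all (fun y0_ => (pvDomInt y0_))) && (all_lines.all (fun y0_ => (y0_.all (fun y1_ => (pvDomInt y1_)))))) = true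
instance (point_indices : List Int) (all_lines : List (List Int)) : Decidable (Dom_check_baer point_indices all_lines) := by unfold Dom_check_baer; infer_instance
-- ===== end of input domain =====

-- B replaces A's early-return scan plus a second counting scan by one frequency
-- table of per-line intersection sizes, validated against {1,3} (objective: simpler).

-- ===== PORT A =====
-- len(set(line) & pset)  (shared subexpression of both Pythons)
def pvISize (pset : PySem.Set Int) (line : List Int) : Int :=
  PySem.Set.len (PySem.Set.inter (PySem.Set.ofList line) pset)

-- A's first loop: early `return False` when a line meets in neither 1 nor 3 points
def pvAFirst (pset : PySem.Set Int) : List (List Int) → Bool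
  | [] => true
  | line :: rest =>
      if ¬ (pvISize pset line = 1 ∨ pvISize pset line = 3) then false
      else pvAFirst pset rest

def check_baer (point_indices : List Int) (all_lines : List (List Int)) : Bool :=
  if point_indices.length ≠ 7 then false
  else
    let pset := PySem.Set.ofList point_indices
    if pvAFirst pset all_lines then
      -- A's second loop: count the lines meeting in 3 points
      (all_lines.foldl (fun acc line => if pvISize pset line = 3 then acc + 1 else acc) (0 : Int)) == 7
    else false

-- ===== PORT B =====
def check_baer_alt (point_indices : List Int) (all_lines : List (List Int)) : Bool :=
  if point_indices.length ≠ 7 then false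
  else
    let pset := PySem.Set.ofList point_indices
    let sizes := all_lines.map (fun line => pvISize pset line)
    let counts := PySem.Dict.counter sizes   -- the counts[k] = counts.get(k,0)+1 loop
    counts.keys.all (fun k => k == 1 || k == 3) && (counts.getD 3 0 == 7)

-- ===== PRECONDITION & SPEC =====
def Spec_check_baer (point_indices : List Int) (all_lines : List (List Int)) (out : Bool) : Prop := out = check_baer_alt point_indices all_lines
instance (point_indices : List Int) (all_lines : List (List Int)) (out : Bool) : Decidable (Spec_check_baer point_indices all_lines out) := by unfold Spec_check_baer; infer_instance

-- ===== CLAIM (what is proved, stated in full; the proofs are below) =====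
def Claim_equal_check_baer : Prop := ∀ (point_indices : List Int) (all_lines : List (List Int)), Dom_check_baer point_indices all_lines → Spec_check_baer point_indices all_lines (check_baer point_indices all_lines)

-- ===== LEMMAS AND PROOFS =====

-- A's early-exit scan succeeds iff every intersection size is 1 or 3
lemma pvAFirst_eq_all (pset : PySem.Set Int) (ls : List (List Int)) :
    pvAFirst pset ls = ls.all (fun line => pvISize pset line == 1 || pvISize pset line == 3) := by
  induction ls with
  | nil => rfl
  | cons line rest ih =>
      simp only [pvAFirst, List.all_cons, ih]
      by_cases h1 : pvISize pset line = 1 <;> by_cases h3 : pvISize pset line = 3 <;>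
        simp [h1, h3]

lemma all_ofList (xs : List Int) (p : Int → Bool) :
    (PySem.Set.ofList xs).all p = xs.all p := by
  apply Bool.eq_iff_iff.mpr
  simp only [List.all_eq_true]
  constructor
  · intro h x hx; exact h x ((PySem.Set.mem_ofList xs x).mpr hx)
  · intro h x hx; exact h x ((PySem.Set.mem_ofList xs x).mp hx)

-- ===== VERDICT (by name: the statement is the Claim_ definition above) =====
theorem check_baer_spec : Claim_equal_check_baer := by
  intro point_indices all_lines _
  unfold Spec_check_baer check_baer check_baer_alt
  by_cases hlen : point_indices.length ≠ 7
  · simp [hlen]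
  · simp only [hlen, if_false]
    set pset := PySem.Set.ofList point_indices with hp
    have hf : (fun (acc : Int) line => if pvISize pset line = 3 then acc + 1 else acc)
        = (fun (acc : Int) line => if (fun l => pvISize pset l == 3) line = true then acc + 1 else acc) := by
      funext acc line; simp
    rw [pvAFirst_eq_all, PySem.Dict.keys_counter, all_ofList, PySem.Dict.getD_counter,
      List.all_map, hf, PySem.List.foldl_count_if]
    simp only [Function.comp_def, zero_add, List.count_eq_countP, List.countP_map]
    by_cases hall : all_lines.all (fun line => pvISize pset line == 1 || pvISize pset line == 3)
    · simp [hall]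
    · simp [hall]
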